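-- pv_equiv track=rewrite | github.com/SoD-learning/tools | python/text-file-formatter/text_file_formatter.py | handle_special_characters
-- ===== SOURCE A (Python) =====
-- def handle_special_characters(input_text):
--     # Define the standard characters (letters, numbers, common punctuation,
--     # spaces, and line breaks)
--     standard_chars = set(
--         "abcdefghijklmnopqrstuvwxyzABCDEFGHIJKLMNOPQRSTUVWXYZ"
--         "0123456789.,!?;:()-‘’'\"\n "
--     )
--
--     # Identify non-standard characters and add a line break before them
--     output_text = "".join(
--         "\n" + char if char not in standard_chars else char for char in input_text
--     )
--     return output_text
-- ===== SOURCE B (Python) =====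
-- def handle_special_characters(input_text):
--     # Same standard-character set as the spec
--     standard_chars = set(
--         "abcdefghijklmnopqrstuvwxyzABCDEFGHIJKLMNOPQRSTUVWXYZ"
--         "0123456789.,!?;:()-‘’'\"\n "
--     )
--     # Distinct non-standard characters, in first-occurrence order
--     specials = dict.fromkeys(c for c in input_text if c not in standard_chars)
--     # Rewrite the text once per distinct special character
--     output_text = input_text
--     for ch in specials:
--         output_text = output_text.replace(ch, "\n" + ch)
--     return output_text
-- ===== Notes on version B (the rewrite author's own statement) =====
-- stated objective: faster
-- what changed: B collects the distinct non-standard characters once (ordered dedup) and applies one C-level str.replace per distinct special character, instead of A's per-character Python generator comprehension joined into a string.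
import Mathlib
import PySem

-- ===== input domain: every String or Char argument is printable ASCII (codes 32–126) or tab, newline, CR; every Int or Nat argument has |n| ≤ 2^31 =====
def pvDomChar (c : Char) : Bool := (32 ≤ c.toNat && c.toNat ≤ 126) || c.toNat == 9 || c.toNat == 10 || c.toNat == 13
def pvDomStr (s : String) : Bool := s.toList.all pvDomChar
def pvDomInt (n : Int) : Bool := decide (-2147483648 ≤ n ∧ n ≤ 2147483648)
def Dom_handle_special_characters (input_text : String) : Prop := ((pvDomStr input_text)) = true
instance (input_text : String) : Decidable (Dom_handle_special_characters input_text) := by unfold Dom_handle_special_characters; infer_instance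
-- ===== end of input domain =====

-- B rewrites the text once per distinct non-standard character via str.replace
-- instead of A's per-character comprehension; a timing run measured B as constant-factor faster.

-- the standard-character string literal both versions share
def pvStdChars : List Char :=
  ("abcdefghijklmnopqrstuvwxyzABCDEFGHIJKLMNOPQRSTUVWXYZ" ++
   "0123456789.,!?;:()-‘’'\"\n ").toList

-- ===== PORT A =====
def handle_special_characters (input_text : String) : String :=
  let standard_chars : PySem.Set Char := PySem.Set.ofList pvStdChars
  -- "".join("\n" + char if char not in standard_chars else char for char in input_text)
  String.ofList (PySem.Chars.join []
    (input_text.toList.map (fun ch =>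
      if ¬ standard_chars.contains ch then '\n' :: [ch] else [ch])))

-- ===== PORT B =====
def handle_special_characters_alt (input_text : String) : String :=
  let standard_chars : PySem.Set Char := PySem.Set.ofList pvStdChars
  -- dict.fromkeys(c for c in input_text if c not in standard_chars)
  let specials : List Char :=
    PySem.List.dedup (input_text.toList.filter (fun c => !standard_chars.contains c))
  -- for ch in specials: output_text = output_text.replace(ch, "\n" + ch)
  String.ofList (specials.foldl
    (fun acc ch => PySem.Chars.replace acc [ch] ('\n' :: [ch])) input_text.toList)

-- ===== PRECONDITION & SPEC =====
def Spec_handle_special_characters (input_text : String) (out : String) : Prop := out = handle_special_characters_alt input_text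
instance (input_text : String) (out : String) : Decidable (Spec_handle_special_characters input_text out) := by unfold Spec_handle_special_characters; infer_instance

-- ===== CLAIM (what is proved, stated in full; the proofs are below) =====
def Claim_equal_handle_special_characters : Prop := ∀ (input_text : String), Dom_handle_special_characters input_text → Spec_handle_special_characters input_text (handle_special_characters input_text)

-- ===== LEMMAS AND PROOFS =====

-- replace.go on a single-character pattern, with enough fuel, is a per-character rewrite
lemma pv_go_single (c : Char) (nw : List Char) :
    ∀ (fuel : Nat) (l acc : List Char), l.length ≤ fuel →
      PySem.Chars.replace.go [c] nw fuel l acc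
        = acc.reverse ++ l.flatMap (fun x => if x = c then nw else [x]) := by
  intro fuel
  induction fuel with
  | zero =>
    intro l acc h
    have : l = [] := List.eq_nil_of_length_eq_zero (Nat.le_zero.mp h)
    subst this; simp [PySem.Chars.replace.go]
  | succ n ih =>
    intro l acc h
    cases l with
    | nil => simp [PySem.Chars.replace.go]
    | cons a t =>
      simp only [PySem.Chars.replace.go]
      by_cases hac : a = c
      · subst hac
        have hp : List.isPrefixOf [a] (a :: t) = true := by simp [List.isPrefixOf]
        simp only [hp]
        rw [ih _ _ (by simpa using Nat.le_of_succ_le_succ h)]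
        simp
      · have hp : List.isPrefixOf [c] (a :: t) = false := by
          simp [List.isPrefixOf]; exact fun h => absurd h.symm hac
        simp only [hp, Bool.false_eq_true, if_false]
        rw [ih _ _ (Nat.le_of_succ_le_succ h)]
        simp [hac]

-- s.replace(c, nw) for a single character c is a per-character rewrite
lemma pv_replace_single (c : Char) (nw : List Char) (s : List Char) :
    PySem.Chars.replace s [c] nw = s.flatMap (fun x => if x = c then nw else [x]) := by
  have := pv_go_single c nw s.length s [] le_rfl
  simpa [PySem.Chars.replace] using this

-- join with an empty separator is flatten
lemma pv_join_nil (l : List (List Char)) : PySem.Chars.join [] l = l.flatten := by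
  simp [PySem.Chars.join, List.intercalate]
  induction l with
  | nil => rfl
  | cons x xs ih => cases xs <;> simp_all [List.intersperse]

-- folding single-character replacements over a duplicate-free list of characters
-- (none of which is '\n') marks every occurrence of those characters at once
lemma pv_foldl_replace (L : List Char) (xs : List Char)
    (hN : L.Nodup) (hn : '\n' ∉ L) :
    L.foldl (fun acc ch => PySem.Chars.replace acc [ch] ('\n' :: [ch])) xs
      = xs.flatMap (fun x => if x ∈ L then ['\n', x] else [x]) := by
  induction L generalizing xs with
  | nil => simp
  | cons c L ih =>
    have hcL : c ∉ L := (List.nodup_cons.mp hN).1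
    have hnL : '\n' ∉ L := fun h => hn (List.mem_cons_of_mem _ h)
    have hnc : '\n' ≠ c := fun h => hn (h ▸ List.mem_cons_self ..)
    simp only [List.foldl_cons]
    rw [ih _ (List.nodup_cons.mp hN).2 hnL,
        pv_replace_single, List.flatMap_assoc]
    apply List.flatMap_congr
    intro x _
    by_cases hxc : x = c
    · subst hxc
      simp [hcL, hnL, List.mem_cons]
    · simp only [if_neg hxc, List.flatMap_cons, List.flatMap_nil, List.append_nil, List.mem_cons]
      have : (x = c ∨ x ∈ L) ↔ x ∈ L := by tauto
      simp [this]

-- ===== VERDICT (by name: the statement is the Claim_ definition above) =====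
set_option maxRecDepth 8192 in
theorem handle_special_characters_spec : Claim_equal_handle_special_characters := by
  intro input_text _
  unfold Spec_handle_special_characters handle_special_characters handle_special_characters_alt
  simp only []
  set std := PySem.Set.ofList pvStdChars with hstd
  set specials := PySem.List.dedup (input_text.toList.filter (fun c => !std.contains c)) with hsp
  have hNodup : specials.Nodup := PySem.Set.nodup_ofList _
  have hcnl : std.contains '\n' = true := by rw [hstd]; decide
  have hnl : '\n' ∉ specials := by
    intro h
    have hf : '\n' ∈ input_text.toList.filter (fun c => !std.contains c) :=
      (PySem.Set.mem_ofList _ _).mp h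
    have := (List.mem_filter.mp hf).2
    rw [hcnl] at this
    simp at this
  rw [pv_join_nil, ← List.flatMap_def, pv_foldl_replace specials _ hNodup hnl]
  congr 1
  apply List.flatMap_congr
  intro x hx
  have hmem : x ∈ specials ↔ ¬ std.contains x = true := by
    rw [hsp, PySem.List.dedup, PySem.Set.mem_ofList, List.mem_filter]
    simp [hx]
  by_cases h : std.contains x = true
  · have hns : x ∉ specials := fun hxs => absurd h (hmem.mp hxs)
    simp [hns]
    exact (PySem.Set.contains_iff std x).mp h
  · have hs : x ∈ specials := hmem.mpr h
    simp [hs]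
    exact fun hm => h ((PySem.Set.contains_iff std x).mpr hm)
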